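-- pv_equiv track=rewrite | github.com/bijoydoteth/uniswap_arbitrage | py_calculations/optimizeV3.py | getNextTick
-- ===== SOURCE A (Python) =====
-- def getNextTick(tickMap,currentTick:int,toLeft:bool,tickMapRange):
--
--     # Check if current Tick is in the tick range
--     if (currentTick<=tickMapRange[0] or currentTick>=tickMapRange[1]):
--         return None
--
--     # If no next tick to fetch but within the tickMapRange, create a virtual tick
--     if (len(tickMap)>0):
--         if (toLeft and currentTick<tickMap[len(tickMap)-1][0]):
--                 return [tickMapRange[0],0,0]
--         elif((not toLeft) and currentTick>tickMap[0][0]):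
--                 return [tickMapRange[1],0,0]
--     else:
--         if (toLeft):
--             return [tickMapRange[0],0,0]
--         else:
--             return [tickMapRange[1],0,0]
--
--     newtickMap = []
--
--     if toLeft:
--         # Find all ticks below current tick
--         for i in range(len(tickMap)):
--             if (tickMap[i][0]<currentTick):
--                 newtickMap.append(tickMap[i])
--
--         if(len(newtickMap)==0):
--             return None
--         else:
--             return newtickMap[0]
--     else:
--         # Find all ticks above current tick
--         for i in range(len(tickMap)):
--             if (tickMap[i][0]>currentTick):
--                 newtickMap.append(tickMap[i])
--         if(len(newtickMap)==0):
--             return None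
--         else:
--             return newtickMap[len(newtickMap)-1]
-- ===== SOURCE B (Python) =====
-- def getNextTick(tickMap, currentTick: int, toLeft: bool, tickMapRange):
--     lo, hi = tickMapRange[0], tickMapRange[1]
--     if not (lo < currentTick < hi):
--         return None
--     if toLeft:
--         if not tickMap or currentTick < tickMap[-1][0]:
--             return [lo, 0, 0]
--         return next((row for row in tickMap if row[0] < currentTick), None)
--     else:
--         if not tickMap or currentTick > tickMap[0][0]:
--             return [hi, 0, 0]
--         return next((row for row in reversed(tickMap) if row[0] > currentTick), None)
-- ===== Notes on version B (the rewrite author's own statement) =====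
-- stated objective: simpler
-- what changed: B replaces A's build-a-filtered-copy-then-index approach with direct short-circuit searches: first matching row below (or, scanning in reverse, above) the current tick, with the virtual-tick cases folded into one guard per direction; no intermediate list is built.
-- outside the precondition, e.g. on getNextTick([], 0, True, [5]): A returns None, B raises IndexError; on getNextTick([[9], [], [8]], 3, True, [0, 10]): A returns [0, 0, 0], B returns [0, 0, 0]
import Mathlib
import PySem

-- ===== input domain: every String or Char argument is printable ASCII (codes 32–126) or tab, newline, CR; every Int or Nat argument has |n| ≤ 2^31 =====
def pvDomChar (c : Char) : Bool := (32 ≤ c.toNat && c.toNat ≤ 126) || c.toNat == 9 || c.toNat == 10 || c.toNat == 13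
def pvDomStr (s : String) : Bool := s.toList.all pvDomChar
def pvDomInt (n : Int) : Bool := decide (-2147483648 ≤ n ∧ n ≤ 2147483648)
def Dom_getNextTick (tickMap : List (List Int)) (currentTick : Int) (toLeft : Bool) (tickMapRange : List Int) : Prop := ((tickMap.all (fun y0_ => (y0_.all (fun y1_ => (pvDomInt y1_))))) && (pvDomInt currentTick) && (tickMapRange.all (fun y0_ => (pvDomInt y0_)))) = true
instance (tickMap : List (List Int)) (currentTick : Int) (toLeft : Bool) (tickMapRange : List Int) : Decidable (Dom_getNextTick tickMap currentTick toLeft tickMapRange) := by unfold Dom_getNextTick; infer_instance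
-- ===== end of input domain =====

-- B replaces A's build-a-filtered-copy-then-index approach with direct short-circuit searches
-- (find? forward / find? on the reversed list), folding the virtual-tick cases into one guard
-- per direction; objective: simpler (no intermediate list), same asymptotic cost.


-- ===== PORT A =====
-- row[0] (on Pre_ every row accessed on the executed path is nonempty, so the default is never used)
def pvRow0 (row : List Int) : Int := (PySem.List.pyGet? row 0).getD 0

def getNextTick (tickMap : List (List Int)) (currentTick : Int) (toLeft : Bool) (tickMapRange : List Int) : Option (List Int) :=
  let r0 := (PySem.List.pyGet? tickMapRange 0).getD 0
  let r1 := (PySem.List.pyGet? tickMapRange 1).getD 0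
  if currentTick ≤ r0 ∨ r1 ≤ currentTick then none
  else if 0 < tickMap.length then
    if toLeft = true ∧ currentTick < pvRow0 ((PySem.List.pyGet? tickMap ((tickMap.length : Int) - 1)).getD []) then
      some [r0, 0, 0]
    else if toLeft = false ∧ pvRow0 ((PySem.List.pyGet? tickMap 0).getD []) < currentTick then
      some [r1, 0, 0]
    else if toLeft then
      let newtickMap := tickMap.foldl (fun acc row => if pvRow0 row < currentTick then acc ++ [row] else acc) []
      if newtickMap.length = 0 then none
      else PySem.List.pyGet? newtickMap 0
    else
      let newtickMap := tickMap.foldl (fun acc row => if currentTick < pvRow0 row then acc ++ [row] else acc) []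
      if newtickMap.length = 0 then none
      else PySem.List.pyGet? newtickMap ((newtickMap.length : Int) - 1)
  else if toLeft then some [r0, 0, 0] else some [r1, 0, 0]

def getNextTick_alt (tickMap : List (List Int)) (currentTick : Int) (toLeft : Bool) (tickMapRange : List Int) : Option (List Int) :=
  let lo := (PySem.List.pyGet? tickMapRange 0).getD 0
  let hi := (PySem.List.pyGet? tickMapRange 1).getD 0
  if lo < currentTick ∧ currentTick < hi then
    if toLeft then
      if tickMap.isEmpty || decide (currentTick < pvRow0 ((PySem.List.pyGet? tickMap (-1)).getD [])) then
        some [lo, 0, 0]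
      else tickMap.find? (fun row => decide (pvRow0 row < currentTick))
    else
      if tickMap.isEmpty || decide (pvRow0 ((PySem.List.pyGet? tickMap 0).getD []) < currentTick) then
        some [hi, 0, 0]
      else tickMap.reverse.find? (fun row => decide (currentTick < pvRow0 row))
  else none

-- ===== PRECONDITION & SPEC =====
-- Pre_ excludes exactly the inputs where the Python raises IndexError: a tickMapRange with fewer
-- than two entries, and empty rows in tickMap while currentTick lies strictly inside the range
-- (this second clause also excludes a few inputs where A still returns a value because it happens
-- not to touch the empty row — see the cites in the claim).
def Pre_getNextTick (tickMap : List (List Int)) (currentTick : Int) (toLeft : Bool) (tickMapRange : List Int) : Prop :=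
  2 ≤ tickMapRange.length ∧
  ((tickMapRange.getD 0 0 < currentTick ∧ currentTick < tickMapRange.getD 1 0) → ∀ row ∈ tickMap, row ≠ [])
instance (tickMap : List (List Int)) (currentTick : Int) (toLeft : Bool) (tickMapRange : List Int) : Decidable (Pre_getNextTick tickMap currentTick toLeft tickMapRange) := by unfold Pre_getNextTick; infer_instance

def pvWitness_getNextTick : List (List Int) × Int × Bool × List Int := ([[10, 1, 1], [5, 2, 2]], 7, true, [0, 100])

def Spec_getNextTick (tickMap : List (List Int)) (currentTick : Int) (toLeft : Bool) (tickMapRange : List Int) (out : Option (List Int)) : Prop := out = getNextTick_alt tickMap currentTick toLeft tickMapRange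
instance (tickMap : List (List Int)) (currentTick : Int) (toLeft : Bool) (tickMapRange : List Int) (out : Option (List Int)) : Decidable (Spec_getNextTick tickMap currentTick toLeft tickMapRange out) := by unfold Spec_getNextTick; infer_instance

-- ===== CLAIM (what is proved, stated in full; the proofs are below) =====
def Claim_equal_getNextTick : Prop := ∀ (tickMap : List (List Int)) (currentTick : Int) (toLeft : Bool) (tickMapRange : List Int), Dom_getNextTick tickMap currentTick toLeft tickMapRange → Pre_getNextTick tickMap currentTick toLeft tickMapRange → Spec_getNextTick tickMap currentTick toLeft tickMapRange (getNextTick tickMap currentTick toLeft tickMapRange)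

-- ===== LEMMAS AND PROOFS =====

theorem pvGet_last (l : List (List Int)) (h : l ≠ []) :
    PySem.List.pyGet? l ((l.length : Int) - 1) = l.getLast? := by
  have hl : 0 < l.length := List.length_pos_iff.mpr h
  have h2 : ((l.length : Int) - 1) = ((l.length - 1 : Nat) : Int) := by omega
  rw [h2, PySem.List.pyGet?_natCast, List.getLast?_eq_getElem?]

theorem pvGet_zero (l : List (List Int)) : PySem.List.pyGet? l 0 = l.head? := by
  cases l <;> simp [PySem.List.pyGet?, PySem.List.pyIdx?]

theorem pvFoldFilter (q : List Int → Prop) [DecidablePred q] (l : List (List Int)) :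
  l.foldl (fun acc row => if q row then acc ++ [row] else acc) [] = l.filter (fun row => decide (q row)) := by
  simpa using PySem.List.foldl_append_if (fun row => decide (q row)) id l []

theorem pvFilter_head (p : List Int → Bool) (l : List (List Int)) :
    PySem.List.pyGet? (l.filter p) 0 = l.find? p := by
  rw [pvGet_zero, List.head?_filter]

theorem pvFilter_last (p : List Int → Bool) (l : List (List Int)) :
    PySem.List.pyGet? (l.filter p) (((l.filter p).length : Int) - 1) = l.reverse.find? p := by
  by_cases h : l.filter p = []
  · have h2 : l.reverse.find? p = none := by
      rw [List.find?_eq_none]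
      intro a ha
      simpa using List.filter_eq_nil_iff.mp h a (List.mem_reverse.mp ha)
    rw [h, h2]
    simp [PySem.List.pyGet?, PySem.List.pyIdx?]
  · rw [pvGet_last _ h, List.getLast?_eq_head?_reverse, ← List.filter_reverse, List.head?_filter]




theorem ports_eq (tickMap : List (List Int)) (currentTick : Int) (toLeft : Bool) (tickMapRange : List Int) :
    getNextTick tickMap currentTick toLeft tickMapRange = getNextTick_alt tickMap currentTick toLeft tickMapRange := by
  unfold getNextTick getNextTick_alt
  by_cases hr : currentTick ≤ (PySem.List.pyGet? tickMapRange 0).getD 0 ∨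
      (PySem.List.pyGet? tickMapRange 1).getD 0 ≤ currentTick
  · rw [if_pos hr]
    rw [if_neg (by omega)]
  · rw [if_neg hr]
    conv_rhs => rw [if_pos (⟨by omega, by omega⟩ :
      (PySem.List.pyGet? tickMapRange 0).getD 0 < currentTick ∧
        currentTick < (PySem.List.pyGet? tickMapRange 1).getD 0)]
    cases tickMap with
    | nil =>
      rw [if_neg (by simp)]
      cases toLeft <;> simp
    | cons x xs =>
      have hne : (x :: xs) ≠ [] := List.cons_ne_nil x xs
      rw [if_pos (by simp), pvGet_last _ hne]
      conv_rhs => rw [PySem.List.pyGet?_neg_one]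
      have hg : (PySem.List.pyGet? (x :: xs) 0).getD [] = x := by rw [pvGet_zero]; rfl
      rw [hg]
      cases toLeft with
      | true =>
        by_cases hv : currentTick < pvRow0 ((x :: xs).getLast?.getD [])
        · rw [if_pos ⟨rfl, hv⟩]
          conv_rhs => rw [if_pos rfl, if_pos (show ((x :: xs).isEmpty ||
            decide (currentTick < pvRow0 ((x :: xs).getLast?.getD []))) = true by simp [hv])]
        · rw [if_neg (by simp [hv]), if_neg (by simp), if_pos rfl,
            pvFoldFilter (fun row => pvRow0 row < currentTick)]
          conv_rhs => rw [if_pos rfl, if_neg (show ¬ ((x :: xs).isEmpty ||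
            decide (currentTick < pvRow0 ((x :: xs).getLast?.getD []))) = true by simp [hv])]
          by_cases hz : ((x :: xs).filter (fun row => decide (pvRow0 row < currentTick))).length = 0
          · rw [if_pos hz]
            have hf : (x :: xs).find? (fun row => decide (pvRow0 row < currentTick)) = none := by
              rw [List.find?_eq_none]
              intro a ha
              simpa using List.filter_eq_nil_iff.mp (List.length_eq_zero_iff.mp hz) a ha
            rw [hf]
          · rw [if_neg hz, pvFilter_head]
      | false =>
        by_cases hv : pvRow0 x < currentTick
        · rw [if_neg (by simp), if_pos ⟨rfl, hv⟩]
          conv_rhs => rw [if_neg (by simp), if_pos (show ((x :: xs).isEmpty ||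
            decide (pvRow0 x < currentTick)) = true by simp [hv])]
        · rw [if_neg (by simp), if_neg (by simp [hv]), if_neg (by simp),
            pvFoldFilter (fun row => currentTick < pvRow0 row)]
          conv_rhs => rw [if_neg (by simp), if_neg (show ¬ ((x :: xs).isEmpty ||
            decide (pvRow0 x < currentTick)) = true by simp [hv])]
          by_cases hz : ((x :: xs).filter (fun row => decide (currentTick < pvRow0 row))).length = 0
          · rw [if_pos hz]
            have hf : (x :: xs).reverse.find? (fun row => decide (currentTick < pvRow0 row)) = none := by
              rw [List.find?_eq_none]
              intro a ha
              simpa using List.filter_eq_nil_iff.mp (List.length_eq_zero_iff.mp hz) a (List.mem_reverse.mp ha)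
            rw [hf]
          · rw [if_neg hz, pvFilter_last]

-- ===== VERDICT (by name: the statement is the Claim_ definition above) =====
theorem getNextTick_spec : Claim_equal_getNextTick := by
  intro tickMap currentTick toLeft tickMapRange _ _
  unfold Spec_getNextTick
  exact ports_eq tickMap currentTick toLeft tickMapRange
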